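-- pv_equiv track=rewrite | github.com/gakkistyle/comp9021 | Lecture_10_Material/Three_special_perfect_squares/three_special_perfect_squares_v3.py | digits_if_ok
-- ===== SOURCE A (Python) =====
-- def digits_if_ok(number, digits_seen_before):
--     while number:
--         number, digit = divmod(number, 10)
--         digits_seen_now = digits_seen_before | 1 << digit
--         if digits_seen_now == digits_seen_before:
--             return
--         digits_seen_before = digits_seen_now
--     return digits_seen_before
-- ===== SOURCE B (Python) =====
-- def digits_if_ok(number, digits_seen_before):
--     # Phase 1: collect all decimal digits of number (least significant first).
--     digits = []
--     while number:
--         number, digit = divmod(number, 10)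
--         digits.append(digit)
--     # Phase 2a: an internal repeat means fewer distinct digits than digits.
--     if len(set(digits)) != len(digits):
--         return None
--     # Phase 2b: overlap with previously seen digits.
--     digit_mask = 0
--     for d in digits:
--         digit_mask |= 1 << d
--     if digit_mask & digits_seen_before:
--         return None
--     return digits_seen_before | digit_mask
-- ===== Notes on version B (the rewrite author's own statement) =====
-- stated objective: alternative
-- what changed: A interleaves duplicate detection with mask building, comparing the mask before/after each digit and early-returning inside the loop; B first collects the digit list, then detects an internal repeat by set cardinality, then builds the mask once and tests overlap with digits_seen_before by a single bitwise AND.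
-- outside the precondition, e.g. on digits_if_ok(-5, 0): A returns None, B does not finish within the time limit; on digits_if_ok(-123, 7): A returns None, B does not finish within the time limit
import Mathlib
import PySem

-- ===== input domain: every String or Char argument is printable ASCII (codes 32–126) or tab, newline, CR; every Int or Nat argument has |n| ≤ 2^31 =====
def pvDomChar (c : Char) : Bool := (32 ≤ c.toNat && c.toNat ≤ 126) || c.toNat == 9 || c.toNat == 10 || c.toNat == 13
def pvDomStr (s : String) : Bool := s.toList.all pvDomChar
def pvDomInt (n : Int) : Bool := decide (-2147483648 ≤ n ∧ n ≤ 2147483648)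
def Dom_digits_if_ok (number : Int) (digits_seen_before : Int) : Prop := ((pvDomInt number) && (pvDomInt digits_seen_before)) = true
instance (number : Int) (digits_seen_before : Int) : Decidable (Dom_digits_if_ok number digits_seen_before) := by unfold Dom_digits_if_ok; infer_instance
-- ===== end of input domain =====

-- B replaces A's interleaved compare-per-digit loop by three phases (collect the digit list,
-- detect a repeat by set cardinality, test mask overlap by one AND); alternative decomposition, same cost.


-- ===== PORT A =====
-- The lemmas pvNat_sub_land … pvUnset_lt below this line exist only because port A's `while number:`
-- loop needs a termination measure (Python A terminates on every int: for negative number the loop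
-- reaches -1 and then repeats digit 9, hitting the repeat-return after at most 10 more rounds);
-- the port cites them by name in `decreasing_by`.

-- x - (x &&& y) clears from x exactly the bits shared with y
theorem pvNat_sub_land (x y : Nat) : x - (x &&& y) = Nat.ldiff x y := by
  induction x using Nat.binaryRec generalizing y with
  | zero =>
      apply Nat.eq_of_testBit_eq
      intro i
      simp [Nat.testBit_ldiff]
  | bit b n ih =>
      rw [← Nat.bit_testBit_zero_shiftRight_one y, Nat.land_bit, Nat.ldiff_bit]
      have h1 := ih (y >>> 1)
      have hle : n &&& (y >>> 1) ≤ n := Nat.and_le_left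
      cases b <;> cases hb : y.testBit 0 <;> simp [Nat.bit_val] <;> omega

-- PySem's Python-exact bitwise or/and agree with Mathlib's Int.lor/Int.land
theorem pvBor_eq_lor (a b : Int) : PySem.Int.bor a b = Int.lor a b := by
  rcases a with m | m <;> rcases b with n | n <;>
    simp [PySem.Int.bor, Int.lor, Int.negSucc_eq, pvNat_sub_land] <;> omega

theorem pvTb_bor (a b : Int) (k : Nat) : (PySem.Int.bor a b).testBit k = (a.testBit k || b.testBit k) := by
  rw [pvBor_eq_lor]; exact Int.testBit_lor a b k

-- two integers with the same two's-complement bits are equal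
theorem pvTb_ext {a b : Int} (h : ∀ k, a.testBit k = b.testBit k) : a = b := by
  rcases a with m | m <;> rcases b with n | n
  · exact congrArg Int.ofNat (Nat.eq_of_testBit_eq h)
  · exfalso
    have hk := h (m + n + 1)
    have h1 : Nat.testBit m (m + n + 1) = false :=
      Nat.testBit_lt_two_pow (lt_of_lt_of_le (Nat.lt_two_pow_self) (Nat.pow_le_pow_right (by omega) (by omega)))
    have h2 : Nat.testBit n (m + n + 1) = false :=
      Nat.testBit_lt_two_pow (lt_of_lt_of_le (Nat.lt_two_pow_self) (Nat.pow_le_pow_right (by omega) (by omega)))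
    simp [Int.testBit, h1, h2] at hk
  · exfalso
    have hk := h (m + n + 1)
    have h1 : Nat.testBit m (m + n + 1) = false :=
      Nat.testBit_lt_two_pow (lt_of_lt_of_le (Nat.lt_two_pow_self) (Nat.pow_le_pow_right (by omega) (by omega)))
    have h2 : Nat.testBit n (m + n + 1) = false :=
      Nat.testBit_lt_two_pow (lt_of_lt_of_le (Nat.lt_two_pow_self) (Nat.pow_le_pow_right (by omega) (by omega)))
    simp [Int.testBit, h1, h2] at hk
  · have : m = n := Nat.eq_of_testBit_eq (fun i => by
      have := h i; simpa [Int.testBit] using this)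
    rw [this]

theorem pvTb_shift (d k : Nat) : ((1:Int) <<< (d:Nat)).testBit k = decide (k = d) := by
  show Nat.testBit (1 <<< d) k = decide (k = d)
  rw [Nat.shiftLeft_eq, one_mul, Nat.testBit_two_pow]
  simp [eq_comm]

-- A's in-loop test: or-ing in bit d changes nothing iff bit d was already set
theorem pvBor_self_iff (dsb : Int) (d : Nat) :
    PySem.Int.bor dsb ((1:Int) <<< d) = dsb ↔ dsb.testBit d = true := by
  constructor
  · intro h
    have := congrArg (fun x => x.testBit d) h
    simpa [pvTb_bor, pvTb_shift] using this.symm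
  · intro h
    apply pvTb_ext
    intro k
    by_cases hk : k = d <;> simp [pvTb_bor, pvTb_shift, hk, h]

theorem pvFilter_le {α : Type} (l : List α) (p q : α → Bool)
    (hmono : ∀ i ∈ l, q i = true → p i = true) :
    (l.filter q).length ≤ (l.filter p).length := by
  induction l with
  | nil => simp
  | cons a l ih =>
      have ih' := ih (fun i hi => hmono i (List.mem_cons_of_mem a hi))
      by_cases hqa : q a = true
      · have hpa := hmono a (by simp) hqa
        simp [hqa, hpa]
        omega
      · have hqa' : q a = false := by
          cases h : q a
          · rfl
          · exact absurd h hqa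
        by_cases hpa : p a = true <;> simp [hqa', hpa] <;> omega

theorem pvFilter_lt {α : Type} (l : List α) (p q : α → Bool)
    (hmono : ∀ i ∈ l, q i = true → p i = true)
    (d : α) (hd : d ∈ l) (hp : p d = true) (hq : q d = false) :
    (l.filter q).length < (l.filter p).length := by
  induction l with
  | nil => cases hd
  | cons a l ih =>
      rcases List.mem_cons.mp hd with rfl | hdl
      · have hle := pvFilter_le l p q (fun i hi => hmono i (List.mem_cons_of_mem d hi))
        simp [hp, hq]
        omega
      · have ih' := ih (fun i hi => hmono i (List.mem_cons_of_mem a hi)) hdl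
        by_cases hqa : q a = true
        · have hpa := hmono a (by simp) hqa
          simp [hqa, hpa]
          omega
        · have hqa' : q a = false := by
            cases h : q a
            · rfl
            · exact absurd h hqa
          by_cases hpa : p a = true <;> simp [hqa', hpa] <;> omega

-- the loop's secondary measure: low digit-bits of the accumulator still unset
def pvUnset (dsb : Int) : Nat := ((List.range 10).filter (fun i => !dsb.testBit i)).length

theorem pvUnset_lt (dsb : Int) (d : Nat) (hd : d < 10)
    (hne : PySem.Int.bor dsb ((1:Int) <<< d) ≠ dsb) :
    pvUnset (PySem.Int.bor dsb ((1:Int) <<< d)) < pvUnset dsb := by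
  have hbit : dsb.testBit d = false := by
    cases h : dsb.testBit d
    · rfl
    · exact absurd ((pvBor_self_iff dsb d).mpr h) hne
  refine pvFilter_lt (List.range 10) _ _ ?_ d (List.mem_range.mpr hd) (by simp [hbit])
    (by simp [pvTb_bor, pvTb_shift])
  intro i _ hqi
  simp only [pvTb_bor, pvTb_shift] at hqi
  simp only [Bool.not_eq_true'] at hqi ⊢
  exact (Bool.or_eq_false_iff.mp hqi).1

-- `while number:` / `number, digit = divmod(number, 10)`: divmod is PySem floordiv/mod (divisor
-- 10 > 0, so digit = mod number 10 ∈ [0,10) and `.toNat` on the shift amount is exact).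
-- Terminates on every int like Python A: |number| shrinks, or stays (number = -1) while a new
-- low bit is set; the repeat-return bounds that by pvUnset.
def pvLoopA (number : Int) (dsb : Int) : Option Int :=
  if number = 0 then some dsb
  else
    let digit : Nat := (PySem.Int.mod number 10).toNat
    let now : Int := PySem.Int.bor dsb ((1:Int) <<< digit)    -- digits_seen_before | 1 << digit
    if now = dsb then none
    else pvLoopA (PySem.Int.floordiv number 10) now
termination_by (number.natAbs, pvUnset dsb)
decreasing_by
  rename_i _ hne
  have hfd : PySem.Int.floordiv number 10 = number / 10 := PySem.Int.floordiv_eq_ediv_of_pos (by omega)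
  have hle : (number / 10).natAbs ≤ number.natAbs := by omega
  rw [hfd]
  rcases lt_or_eq_of_le hle with hlt | heq
  · exact Prod.Lex.left _ _ hlt
  · rw [heq]
    apply Prod.Lex.right
    apply pvUnset_lt _ _ _ hne
    have h1 : 0 ≤ PySem.Int.mod number 10 := PySem.Int.mod_nonneg number (by norm_num)
    have h2 : PySem.Int.mod number 10 < 10 := PySem.Int.mod_lt number (by norm_num)
    omega

def digits_if_ok (number : Int) (digits_seen_before : Int) : Option Int :=
  pvLoopA number digits_seen_before

-- ===== PORT B =====
-- digits = []; while number: number, digit = divmod(number, 10); digits.append(digit)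
-- ported over number.toNat: exact under Pre_ (0 ≤ number, where Nat div/mod = Python divmod);
-- on negative number Python B does not terminate, and Pre_ excludes those inputs.
def pvDigits : Nat → List Nat
  | 0 => []
  | (n+1) => (n+1) % 10 :: pvDigits ((n+1)/10)
decreasing_by exact Nat.div_lt_self (Nat.succ_pos n) (by omega)

-- digit_mask = 0; for d in digits: digit_mask |= 1 << d
def pvMask (digits : List Nat) : Int :=
  digits.foldl (fun (m : Int) (d : Nat) => PySem.Int.bor m ((1:Int) <<< d)) 0

def digits_if_ok_alt (number : Int) (digits_seen_before : Int) : Option Int :=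
  let digits := pvDigits number.toNat
  if (PySem.Set.ofList digits).length ≠ digits.length then none   -- len(set(digits)) != len(digits)
  else
    let digit_mask := pvMask digits
    if PySem.Int.band digit_mask digits_seen_before ≠ 0 then none -- if digit_mask & digits_seen_before:
    else some (PySem.Int.bor digits_seen_before digit_mask)

-- ===== PRECONDITION & SPEC =====
-- Pre_ excludes negative `number`, on which A still returns: its None there is an artefact of
-- floored divmod cycling at -1 (digit 9 repeats forever, a sham "repeat"), and B's bare
-- `while number:` digit-collection loop does not terminate on those inputs.
def Pre_digits_if_ok (number : Int) (digits_seen_before : Int) : Prop := 0 ≤ number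
instance (number : Int) (digits_seen_before : Int) : Decidable (Pre_digits_if_ok number digits_seen_before) := by unfold Pre_digits_if_ok; infer_instance
def pvWitness_digits_if_ok : Int × Int := (123, 5)

def Spec_digits_if_ok (number : Int) (digits_seen_before : Int) (out : Option Int) : Prop := out = digits_if_ok_alt number digits_seen_before
instance (number : Int) (digits_seen_before : Int) (out : Option Int) : Decidable (Spec_digits_if_ok number digits_seen_before out) := by unfold Spec_digits_if_ok; infer_instance

-- ===== CLAIM (what is proved, stated in full; the proofs are below) =====
def Claim_equal_digits_if_ok : Prop := ∀ (number : Int) (digits_seen_before : Int), Dom_digits_if_ok number digits_seen_before → Pre_digits_if_ok number digits_seen_before → Spec_digits_if_ok number digits_seen_before (digits_if_ok number digits_seen_before)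

-- ===== LEMMAS AND PROOFS =====

theorem pvBand_eq_land (a b : Int) : PySem.Int.band a b = Int.land a b := by
  rcases a with m | m <;> rcases b with n | n <;>
    simp [PySem.Int.band, Int.land, Int.negSucc_eq, pvNat_sub_land] <;> omega

theorem pvTb_band (a b : Int) (k : Nat) : (PySem.Int.band a b).testBit k = (a.testBit k && b.testBit k) := by
  rw [pvBand_eq_land]; exact Int.testBit_land a b k

theorem pvTb_zero (k : Nat) : (0:Int).testBit k = false := by
  show Nat.testBit 0 k = false
  simp

theorem pvTb_mask_foldl (ds : List Nat) (a : Int) (k : Nat) :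
    (ds.foldl (fun (m : Int) (d : Nat) => PySem.Int.bor m ((1:Int) <<< d)) a).testBit k
      = (a.testBit k || decide (k ∈ ds)) := by
  induction ds generalizing a with
  | nil => simp
  | cons d ds ih =>
      simp only [List.foldl_cons, ih, pvTb_bor, pvTb_shift, List.mem_cons]
      by_cases h : k = d <;> simp [h]

theorem pvTb_mask (ds : List Nat) (k : Nat) : (pvMask ds).testBit k = decide (k ∈ ds) := by
  simp [pvMask, pvTb_mask_foldl, pvTb_zero]

-- characterisation of A's loop on the inputs Pre_ admits
theorem pvLoopA_char (n : Nat) : ∀ (dsb : Int),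
    pvLoopA (n : Int) dsb =
      if (pvDigits n).Nodup ∧ (∀ d ∈ pvDigits n, dsb.testBit d = false)
      then some (PySem.Int.bor dsb (pvMask (pvDigits n)))
      else none := by
  induction n using Nat.strong_induction_on with
  | _ n ih =>
    intro dsb
    match n with
    | 0 => simp [pvLoopA, pvDigits, pvMask]
    | (m+1) =>
      rw [pvLoopA, pvDigits]
      have hmod : PySem.Int.mod ((m+1 : Nat) : Int) 10 = (((m+1) % 10 : Nat) : Int) := by
        exact_mod_cast PySem.Int.mod_natCast (m+1) 10
      have hfd : PySem.Int.floordiv ((m+1 : Nat) : Int) 10 = (((m+1) / 10 : Nat) : Int) := by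
        exact_mod_cast PySem.Int.floordiv_natCast (m+1) 10
      rw [if_neg (by exact_mod_cast Nat.succ_ne_zero m)]
      simp only [hmod, hfd, Int.toNat_natCast]
      set d : Nat := (m+1) % 10 with hd
      set rest : List Nat := pvDigits ((m+1)/10) with hrest
      by_cases hbit : dsb.testBit d = true
      · rw [if_pos ((pvBor_self_iff dsb d).mpr hbit)]
        rw [if_neg]
        rintro ⟨-, hall⟩
        have := hall d (by simp)
        simp [hbit] at this
      · have hbitf : dsb.testBit d = false := by
          cases hq : dsb.testBit d
          · rfl
          · exact absurd hq hbit
        rw [if_neg (fun h => hbit ((pvBor_self_iff dsb d).mp h))]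
        rw [ih ((m+1)/10) (Nat.div_lt_self (Nat.succ_pos m) (by omega)) _]
        have hval : PySem.Int.bor (PySem.Int.bor dsb ((1:Int) <<< d)) (pvMask rest)
            = PySem.Int.bor dsb (pvMask (d :: rest)) := by
          apply pvTb_ext
          intro k
          simp only [pvTb_bor, pvTb_shift, pvTb_mask, List.mem_cons]
          by_cases h1 : k = d <;> by_cases h2 : k ∈ rest <;> simp [h1, h2]
        have hcond : (rest.Nodup ∧ ∀ e ∈ rest, (PySem.Int.bor dsb ((1:Int) <<< d)).testBit e = false)
            ↔ ((d :: rest).Nodup ∧ ∀ e ∈ d :: rest, dsb.testBit e = false) := by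
          simp only [pvTb_bor, pvTb_shift, List.nodup_cons, List.mem_cons, Bool.or_eq_false_iff,
            decide_eq_false_iff_not]
          constructor
          · rintro ⟨hnd, hall⟩
            refine ⟨⟨fun hmem => (hall d hmem).2 rfl, hnd⟩, fun e he => ?_⟩
            rcases he with rfl | he
            · exact hbitf
            · exact (hall e he).1
          · rintro ⟨⟨hdnot, hnd⟩, hall⟩
            exact ⟨hnd, fun e he => ⟨hall e (Or.inr he), fun heq => hdnot (heq ▸ he)⟩⟩
        rw [hval]
        exact if_congr hcond rfl rfl

-- B's set-cardinality test detects exactly the lists with a repeat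
theorem pvOfList_length_iff {α : Type} [BEq α] [LawfulBEq α] (ds : List α) :
    (PySem.Set.ofList ds).length = ds.length ↔ ds.Nodup := by
  induction ds using List.reverseRecOn with
  | nil => simp [PySem.Set.ofList]
  | append_singleton xs x ih =>
      rw [PySem.Set.ofList_append_singleton, PySem.Set.add_eq_ite]
      have hnodup_iff : (xs ++ [x]).Nodup ↔ xs.Nodup ∧ x ∉ xs := by
        rw [List.nodup_append]
        constructor
        · rintro ⟨h1, -, h3⟩
          exact ⟨h1, fun hm => h3 x hm x (by simp) rfl⟩
        · rintro ⟨h1, h2⟩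
          exact ⟨h1, List.nodup_singleton x, by
            intro a ha b hb
            simp at hb
            subst hb
            exact fun heq => h2 (heq ▸ ha)⟩
      by_cases hx : x ∈ PySem.Set.ofList xs
      · have hmem : x ∈ xs := (PySem.Set.mem_ofList xs x).mp hx
        rw [if_pos hx]
        have hle : (PySem.Set.ofList xs).length ≤ xs.length := PySem.Set.length_ofList_le xs
        simp only [List.length_append, List.length_cons, List.length_nil, hnodup_iff]
        constructor
        · intro h
          omega
        · rintro ⟨-, h2⟩
          exact absurd hmem h2
      · have hmem : x ∉ xs := fun h => hx ((PySem.Set.mem_ofList xs x).mpr h)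
        rw [if_neg hx]
        simp only [List.length_append, List.length_cons, List.length_nil, hnodup_iff]
        constructor
        · intro h
          exact ⟨ih.mp (by omega), hmem⟩
        · rintro ⟨h1, -⟩
          have := ih.mpr h1
          omega

-- B's mask-overlap test is exactly "no digit of ds is already in dsb"
theorem pvBand_mask_iff (ds : List Nat) (dsb : Int) :
    PySem.Int.band (pvMask ds) dsb = 0 ↔ ∀ d ∈ ds, dsb.testBit d = false := by
  constructor
  · intro h d hd
    have := congrArg (fun x => x.testBit d) h
    simpa [pvTb_band, pvTb_mask, pvTb_zero, hd] using this
  · intro h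
    apply pvTb_ext
    intro k
    rw [pvTb_band, pvTb_mask, pvTb_zero]
    by_cases hk : k ∈ ds
    · simp [hk, h k hk]
    · simp [hk]

-- ===== VERDICT (by name: the statement is the Claim_ definition above) =====
theorem digits_if_ok_spec : Claim_equal_digits_if_ok := by
  intro number dsb _ hpre
  unfold Spec_digits_if_ok digits_if_ok digits_if_ok_alt
  have hcast : ((number.toNat : Nat) : Int) = number := Int.toNat_of_nonneg hpre
  conv_lhs => rw [← hcast]
  rw [pvLoopA_char]
  by_cases h1 : (PySem.Set.ofList (pvDigits number.toNat)).length = (pvDigits number.toNat).length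
  · have hnd : (pvDigits number.toNat).Nodup := (pvOfList_length_iff _).mp h1
    by_cases h2 : PySem.Int.band (pvMask (pvDigits number.toNat)) dsb = 0
    · have hall := (pvBand_mask_iff _ dsb).mp h2
      rw [if_pos ⟨hnd, hall⟩]
      simp [h1, h2]
    · have : ¬ (∀ d ∈ pvDigits number.toNat, dsb.testBit d = false) :=
        fun h => h2 ((pvBand_mask_iff _ dsb).mpr h)
      rw [if_neg (fun hc => this hc.2)]
      simp [h1, h2]
  · have : ¬ (pvDigits number.toNat).Nodup := fun h => h1 ((pvOfList_length_iff _).mpr h)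
    rw [if_neg (fun hc => this hc.1)]
    simp [h1]
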